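-- pv_equiv track=rewrite | github.com/Anmolbaral/DocsRAG | test/test_current_system.py | fake_chat_client
-- ===== SOURCE A (Python) =====
-- def fake_chat_client(messages):
--     # messages contain a system prompt, a document context, prior turns, and the user query
--     doc_line = next(
--         (
--             m
--             for m in messages
--             if m.get("role") == "user"
--             and str(m.get("content", "")).startswith("Document Context:")
--         ),
--         None,
--     )
--     query_line = next(
--         (
--             m
--             for m in messages
--             if m.get("role") == "user"
--             and not str(m.get("content", "")).startswith("Document Context:")
--         ),
--         None,
--     )
--     context_preview = ""
--     if doc_line:
--         content = str(doc_line["content"])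
--         context_preview = content[:120]
--     query_text = query_line["content"] if query_line else ""
--     return f"Based on the provided context, here is a concise answer to your question: {query_text}. Context used: {context_preview}"
-- ===== SOURCE B (Python) =====
-- def fake_chat_client(messages):
--     # One explicit pass maintaining two slots with early exit, instead of two
--     # separate next() scans over the whole list.
--     doc_line = None
--     query_line = None
--     for m in messages:
--         if m.get("role") != "user":
--             continue
--         if str(m.get("content", "")).startswith("Document Context:"):
--             if doc_line is None:
--                 doc_line = m
--         else:
--             if query_line is None:
--                 query_line = m
--         if doc_line is not None and query_line is not None:
--             break
--     context_preview = str(doc_line["content"])[:120] if doc_line else ""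
--     query_text = query_line["content"] if query_line else ""
--     return f"Based on the provided context, here is a concise answer to your question: {query_text}. Context used: {context_preview}"
-- ===== Notes on version B (the rewrite author's own statement) =====
-- stated objective: alternative
-- what changed: Replaces A's two independent next() generator scans with a single explicit loop that fills a doc slot and a query slot (first match each) and breaks once both are set.
import Mathlib
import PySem

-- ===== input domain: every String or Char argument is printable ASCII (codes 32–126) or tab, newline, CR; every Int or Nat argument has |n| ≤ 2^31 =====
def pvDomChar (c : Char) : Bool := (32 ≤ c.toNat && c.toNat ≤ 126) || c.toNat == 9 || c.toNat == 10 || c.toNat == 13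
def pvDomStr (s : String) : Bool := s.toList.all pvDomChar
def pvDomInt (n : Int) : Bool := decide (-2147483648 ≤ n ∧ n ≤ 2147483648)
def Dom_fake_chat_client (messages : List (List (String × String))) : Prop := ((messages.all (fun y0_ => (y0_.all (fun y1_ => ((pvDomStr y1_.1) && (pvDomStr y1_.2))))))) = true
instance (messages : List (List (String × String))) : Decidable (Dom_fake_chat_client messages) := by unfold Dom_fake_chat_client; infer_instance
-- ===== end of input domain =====

-- ===== PORT A =====
-- B replaces A's two separate first-match scans with one loop filling two slots with early exit.
-- Both Pythons raise KeyError when the first non-document user message lacks a "content" key; Pre_ excludes exactly that.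

-- m.get(k): first-match lookup in the message dict
def pvGetS (m : List (String × String)) (k : String) : Option String :=
  (PySem.Dict.mk m).get? k

-- m.get("role") == "user"
def pvIsUser (m : List (String × String)) : Bool :=
  pvGetS m "role" == some "user"

-- str(m.get("content", "")).startswith("Document Context:")
def pvIsDoc (m : List (String × String)) : Bool :=
  PySem.Str.startswith ((pvGetS m "content").getD "") "Document Context:"

def fake_chat_client (messages : List (List (String × String))) : String :=
  -- next((m for m in messages if user and startswith), None)
  let doc_line := messages.find? (fun m => pvIsUser m && pvIsDoc m)
  -- next((m for m in messages if user and not startswith), None)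
  let query_line := messages.find? (fun m => pvIsUser m && !pvIsDoc m)
  let context_preview :=
    match doc_line with
    | some d => if d.isEmpty then "" else PySem.Str.slice ((pvGetS d "content").getD "") none (some 120)
    | none => ""
  let query_text :=
    match query_line with
    | some q => if q.isEmpty then "" else (pvGetS q "content").getD ""
    | none => ""
  "Based on the provided context, here is a concise answer to your question: " ++ query_text ++ ". Context used: " ++ context_preview

-- ===== PORT B =====
-- the for-loop of Source B: two slots, early break once both are filled
def pvScan : List (List (String × String)) → Option (List (String × String)) → Option (List (String × String)) → Option (List (String × String)) × Option (List (String × String))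
  | [], dl, ql => (dl, ql)
  | m :: rest, dl, ql =>
    if !(pvIsUser m) then pvScan rest dl ql        -- continue
    else if pvIsDoc m then
      let dl' := if dl.isNone then some m else dl
      if dl'.isSome && ql.isSome then (dl', ql)    -- break
      else pvScan rest dl' ql
    else
      let ql' := if ql.isNone then some m else ql
      if dl.isSome && ql'.isSome then (dl, ql')    -- break
      else pvScan rest dl ql'

def fake_chat_client_alt (messages : List (List (String × String))) : String :=
  let (doc_line, query_line) := pvScan messages none none
  let context_preview :=
    match doc_line with
    | some d => if d.isEmpty then "" else PySem.Str.slice ((pvGetS d "content").getD "") none (some 120)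
    | none => ""
  let query_text :=
    match query_line with
    | some q => if q.isEmpty then "" else (pvGetS q "content").getD ""
    | none => ""
  "Based on the provided context, here is a concise answer to your question: " ++ query_text ++ ". Context used: " ++ context_preview

-- ===== PRECONDITION & SPEC =====
-- Pre_ excludes exactly the inputs where the first user message whose content does not start with
-- "Document Context:" lacks a "content" key: there A (and B) raise KeyError on query_line["content"].
def Pre_fake_chat_client (messages : List (List (String × String))) : Prop :=
  ((messages.find? (fun m => pvIsUser m && !pvIsDoc m)).all
    (fun q => ((PySem.Dict.mk q).get? "content").isSome)) = true
instance (messages : List (List (String × String))) : Decidable (Pre_fake_chat_client messages) := by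
  unfold Pre_fake_chat_client; infer_instance

def pvWitness_fake_chat_client : (List (List (String × String))) :=
  [[("role", "user"), ("content", "hello")]]

def Spec_fake_chat_client (messages : List (List (String × String))) (out : String) : Prop := out = fake_chat_client_alt messages
instance (messages : List (List (String × String))) (out : String) : Decidable (Spec_fake_chat_client messages out) := by unfold Spec_fake_chat_client; infer_instance

-- ===== CLAIM (what is proved, stated in full; the proofs are below) =====
def Claim_equal_fake_chat_client : Prop := ∀ (messages : List (List (String × String))), Dom_fake_chat_client messages → Pre_fake_chat_client messages → Spec_fake_chat_client messages (fake_chat_client messages)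

-- ===== LEMMAS AND PROOFS =====

-- Loop invariant: as long as not both slots are filled, the scan returns each slot's
-- current value or else the first remaining match of its predicate.
lemma pvScan_eq (messages : List (List (String × String)))
    (dl ql : Option (List (String × String))) (h : ¬(dl.isSome ∧ ql.isSome)) :
    pvScan messages dl ql =
      (dl.or (messages.find? (fun m => pvIsUser m && pvIsDoc m)),
       ql.or (messages.find? (fun m => pvIsUser m && !pvIsDoc m))) := by
  induction messages generalizing dl ql with
  | nil => cases dl <;> cases ql <;> simp [pvScan]
  | cons m rest ih =>
    by_cases hu : pvIsUser m
    · by_cases hd : pvIsDoc m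
      · cases dl with
        | none =>
          cases ql with
          | none => rw [pvScan]; simp [hu, hd, List.find?, ih (some m) none (by simp)]
          | some q => simp [pvScan, hu, hd, List.find?]
        | some d =>
          cases ql with
          | none => rw [pvScan]; simp [hu, hd, List.find?, ih (some d) none (by simp)]
          | some q => exact absurd (by simp) h
      · cases ql with
        | none =>
          cases dl with
          | none => rw [pvScan]; simp [hu, hd, List.find?, ih none (some m) (by simp)]
          | some d => simp [pvScan, hu, hd, List.find?]
        | some q =>
          cases dl with
          | none => rw [pvScan]; simp [hu, hd, List.find?, ih none (some q) (by simp)]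
          | some d => exact absurd (by simp) h
    · simp [pvScan, hu, List.find?, ih _ _ h]

-- ===== VERDICT (by name: the statement is the Claim_ definition above) =====
theorem fake_chat_client_spec : Claim_equal_fake_chat_client := by
  intro messages _ _
  unfold Spec_fake_chat_client fake_chat_client fake_chat_client_alt
  rw [pvScan_eq messages none none (by simp)]
  simp only [Option.or]
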